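-- pv_equiv track=rewrite | github.com/megaDross/bio_modules | get_seq/Ensembl.py | all_intron_regions
-- ===== SOURCE A (Python) =====
-- def all_intron_regions(sorted_exon_regions):
--     ''' Get all intron numbers, start and stop positions
--     '''
--     intron_region = set()
--
--     for i in range(0,len(sorted_exon_regions)):
--         for x in range(0,len(sorted_exon_regions)):
--             if x == i +1:
--                 intron_number = str(sorted_exon_regions[i][0])
--                 end_pos_previous_exon = str(sorted_exon_regions[i][3])
--                 start_pos_next_exon = str(sorted_exon_regions[x][2])
--                 intron_info = (int(intron_number),end_pos_previous_exon,\
--                 start_pos_next_exon,str(int(end_pos_previous_exon)-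
--                                         int(start_pos_next_exon)))
--                 intron_region.add(intron_info)
--
--     return intron_region
-- ===== SOURCE B (Python) =====
-- def all_intron_regions(sorted_exon_regions):
--     ''' Get all intron numbers, start and stop positions
--     '''
--     introns = []
--     for prev_exon, next_exon in zip(sorted_exon_regions, sorted_exon_regions[1:]):
--         intron_number = str(prev_exon[0])
--         end_pos_previous_exon = str(prev_exon[3])
--         start_pos_next_exon = str(next_exon[2])
--         introns.append((int(intron_number), end_pos_previous_exon, start_pos_next_exon,
--                         str(int(end_pos_previous_exon) - int(start_pos_next_exon))))
--     return set(introns)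
-- ===== Notes on version B (the rewrite author's own statement) =====
-- stated objective: faster
-- what changed: Replaced the O(n^2) double index scan (searching every x for x == i+1) by a single pass over consecutive exon pairs via zip, collecting the tuples in a list and deduplicating once with set().
import Mathlib
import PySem

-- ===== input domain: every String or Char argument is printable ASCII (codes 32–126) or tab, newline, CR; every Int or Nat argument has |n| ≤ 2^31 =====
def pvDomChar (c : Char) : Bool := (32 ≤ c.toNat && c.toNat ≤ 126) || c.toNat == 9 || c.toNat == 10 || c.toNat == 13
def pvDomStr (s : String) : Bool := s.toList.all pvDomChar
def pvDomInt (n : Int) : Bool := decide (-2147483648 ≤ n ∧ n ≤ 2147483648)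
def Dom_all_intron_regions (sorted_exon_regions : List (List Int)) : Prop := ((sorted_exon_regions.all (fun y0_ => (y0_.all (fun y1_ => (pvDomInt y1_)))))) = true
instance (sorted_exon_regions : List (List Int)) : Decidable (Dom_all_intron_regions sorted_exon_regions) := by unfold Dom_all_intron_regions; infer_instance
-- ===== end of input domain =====

-- B replaces A's O(n^2) double index scan by a single pass over consecutive exon pairs,
-- building the tuple list once and deduplicating once with set().

-- ===== PORT A =====
def all_intron_regions (sorted_exon_regions : List (List Int)) : List (Int × String × String × String) :=
  (PySem.List.pyRange 0 (PySem.List.len sorted_exon_regions) 1).foldl (fun acc i =>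
    (PySem.List.pyRange 0 (PySem.List.len sorted_exon_regions) 1).foldl (fun acc2 x =>
      if x == i + 1 then
        let intron_number := PySem.Int.toStr (PySem.List.pyGetD (PySem.List.pyGetD sorted_exon_regions i []) 0 0)
        let end_pos_previous_exon := PySem.Int.toStr (PySem.List.pyGetD (PySem.List.pyGetD sorted_exon_regions i []) 3 0)
        let start_pos_next_exon := PySem.Int.toStr (PySem.List.pyGetD (PySem.List.pyGetD sorted_exon_regions x []) 2 0)
        let intron_info := ((PySem.Int.ofStr? intron_number).getD 0, end_pos_previous_exon, start_pos_next_exon,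
          PySem.Int.toStr ((PySem.Int.ofStr? end_pos_previous_exon).getD 0 - (PySem.Int.ofStr? start_pos_next_exon).getD 0))
        PySem.Set.add acc2 intron_info
      else acc2) acc) PySem.Set.empty

-- ===== PORT B =====
-- single pass over consecutive pairs (zip(l, l[1:]) as structural recursion), then one set()
def pvIntronList : List (List Int) → List (Int × String × String × String)
  | prev_exon :: next_exon :: rest =>
      let intron_number := PySem.Int.toStr (PySem.List.pyGetD prev_exon 0 0)
      let end_pos_previous_exon := PySem.Int.toStr (PySem.List.pyGetD prev_exon 3 0)
      let start_pos_next_exon := PySem.Int.toStr (PySem.List.pyGetD next_exon 2 0)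
      ((PySem.Int.ofStr? intron_number).getD 0, end_pos_previous_exon, start_pos_next_exon,
        PySem.Int.toStr ((PySem.Int.ofStr? end_pos_previous_exon).getD 0 - (PySem.Int.ofStr? start_pos_next_exon).getD 0))
        :: pvIntronList (next_exon :: rest)
  | _ => []

def all_intron_regions_alt (sorted_exon_regions : List (List Int)) : List (Int × String × String × String) :=
  PySem.Set.ofList (pvIntronList sorted_exon_regions)

-- ===== PRECONDITION & SPEC =====
-- Pre_ excludes exactly the inputs on which Python A raises IndexError: whenever a row has a
-- successor, A reads row[0] and row[3] of it and row[2] of the successor.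
def Pre_all_intron_regions (sorted_exon_regions : List (List Int)) : Prop :=
  (∀ r ∈ sorted_exon_regions.dropLast, 4 ≤ r.length) ∧ (∀ r ∈ sorted_exon_regions.tail, 3 ≤ r.length)
instance (sorted_exon_regions : List (List Int)) : Decidable (Pre_all_intron_regions sorted_exon_regions) := by unfold Pre_all_intron_regions; infer_instance

def pvWitness_all_intron_regions : List (List Int) := [[1, 100, 200, 300], [2, 400, 500, 600]]

def Spec_all_intron_regions (sorted_exon_regions : List (List Int)) (out : List (Int × String × String × String)) : Prop := out = all_intron_regions_alt sorted_exon_regions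
instance (sorted_exon_regions : List (List Int)) (out : List (Int × String × String × String)) : Decidable (Spec_all_intron_regions sorted_exon_regions out) := by unfold Spec_all_intron_regions; infer_instance

-- ===== CLAIM (what is proved, stated in full; the proofs are below) =====
def Claim_equal_all_intron_regions : Prop := ∀ (sorted_exon_regions : List (List Int)), Dom_all_intron_regions sorted_exon_regions → Pre_all_intron_regions sorted_exon_regions → Spec_all_intron_regions sorted_exon_regions (all_intron_regions sorted_exon_regions)

-- ===== LEMMAS AND PROOFS =====

-- the tuple both programs build from a pair of adjacent exon rows
def pvTup (a b : List Int) : Int × String × String × String :=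
  ((PySem.Int.ofStr? (PySem.Int.toStr (PySem.List.pyGetD a 0 0))).getD 0,
   PySem.Int.toStr (PySem.List.pyGetD a 3 0),
   PySem.Int.toStr (PySem.List.pyGetD b 2 0),
   PySem.Int.toStr ((PySem.Int.ofStr? (PySem.Int.toStr (PySem.List.pyGetD a 3 0))).getD 0
     - (PySem.Int.ofStr? (PySem.Int.toStr (PySem.List.pyGetD b 2 0))).getD 0))

-- A's inner loop fires exactly once, at x = j, when j < m
theorem pv_inner {S : Type} (m j : Nat) (g : S → S) (acc : S) :
    ((List.range m).foldl (fun a x => if x == j then g a else a) acc)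
      = if j < m then g acc else acc := by
  induction m generalizing acc with
  | zero => rw [List.range_zero, List.foldl_nil, if_neg (by omega)]
  | succ m ih =>
      rw [List.range_succ, List.foldl_append, ih]
      simp only [List.foldl_cons, List.foldl_nil, beq_iff_eq]
      split_ifs <;> first | rfl | omega

-- bridge: the pair list B builds equals the indexed tuples A reaches
theorem pv_bridge (l : List (List Int)) :
    pvIntronList l = (List.range (l.length - 1)).map
      (fun (k : Nat) => pvTup (l.getD k []) (l.getD (k + 1) [])) := by
  induction l with
  | nil => simp [pvIntronList]
  | cons a t ih =>
      cases t with
      | nil => simp [pvIntronList]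
      | cons b r =>
          rw [show pvIntronList (a :: b :: r) = pvTup a b :: pvIntronList (b :: r) from rfl, ih]
          rw [show (a :: b :: r).length - 1 = (b :: r).length - 1 + 1 by simp,
              List.range_succ_eq_map, List.map_cons, List.map_map]
          rfl

-- dropping the vacuous last iteration of the outer loop
theorem pv_outer {S : Type} (n : Nat) (h : S → Nat → S) (init : S) :
    (List.range n).foldl (fun acc k => if k + 1 < n then h acc k else acc) init
      = (List.range (n - 1)).foldl h init := by
  cases n with
  | zero => rfl
  | succ m =>
      rw [List.range_succ, List.foldl_append]
      simp only [List.foldl_cons, List.foldl_nil]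
      rw [if_neg (by omega)]
      rw [PySem.List.foldl_congr_mem (List.range m)
            (fun acc k => if k + 1 < m + 1 then h acc k else acc) h init
            (by intro acc k hk; simp only []; rw [if_pos (by simp at hk; omega)])]
      simp

-- A's double loop collapses to folding add over the indexed tuples
theorem pv_A_eq (l : List (List Int)) :
    all_intron_regions l = PySem.Set.ofList ((List.range (l.length - 1)).map
      (fun (k : Nat) => pvTup (l.getD k []) (l.getD (k + 1) []))) := by
  have hR : PySem.Set.ofList ((List.range (l.length - 1)).map
      (fun (k : Nat) => pvTup (l.getD k []) (l.getD (k + 1) [])))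
      = (List.range (l.length - 1)).foldl
          (fun acc k => PySem.Set.add acc (pvTup (l.getD k []) (l.getD (k + 1) []))) [] := by
    rw [PySem.Set.ofList_eq_foldl, List.foldl_map]
  rw [hR, ← pv_outer l.length
      (fun acc k => PySem.Set.add acc (pvTup (l.getD k []) (l.getD (k + 1) []))) []]
  unfold all_intron_regions
  rw [PySem.List.len_eq]
  rw [PySem.List.pyRange_zero_natCast, List.foldl_map]
  refine PySem.List.foldl_congr_mem (List.range l.length) _ _ _ ?_
  intro acc k _
  simp only []
  rw [List.foldl_map]
  have hstep : ∀ (acc2 : PySem.Set (Int × String × String × String)), ∀ x ∈ List.range l.length,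
      (if ((x : Int) == (k : Int) + 1) = true then
        let intron_number := PySem.Int.toStr (PySem.List.pyGetD (PySem.List.pyGetD l (k : Int) []) 0 0)
        let end_pos_previous_exon := PySem.Int.toStr (PySem.List.pyGetD (PySem.List.pyGetD l (k : Int) []) 3 0)
        let start_pos_next_exon := PySem.Int.toStr (PySem.List.pyGetD (PySem.List.pyGetD l (x : Int) []) 2 0)
        let intron_info := ((PySem.Int.ofStr? intron_number).getD 0, end_pos_previous_exon, start_pos_next_exon,
          PySem.Int.toStr ((PySem.Int.ofStr? end_pos_previous_exon).getD 0 - (PySem.Int.ofStr? start_pos_next_exon).getD 0))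
        PySem.Set.add acc2 intron_info
      else acc2)
      = (fun acc2 (x : Nat) => if x == k + 1 then
          PySem.Set.add acc2 (pvTup (l.getD k []) (l.getD (k + 1) [])) else acc2) acc2 x := by
    intro acc2 x _
    beta_reduce
    by_cases hx : x = k + 1
    · subst hx
      rw [show (((k+1:Nat):Int) == (k:Int)+1) = true by rw [beq_iff_eq]; push_cast; ring,
          show (((k:Nat)+1) == k+1) = true by rw [beq_iff_eq],
          if_pos rfl, if_pos rfl]
      simp only [pvTup, PySem.List.pyGetD_natCast]
    · rw [show (((x:Nat):Int) == (k:Int)+1) = false by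
            rw [beq_eq_false_iff_ne]; intro h; exact hx (by exact_mod_cast h),
          show ((x:Nat) == k+1) = false by rw [beq_eq_false_iff_ne]; exact hx,
          if_neg (by simp), if_neg (by simp)]
  rw [PySem.List.foldl_congr_mem (List.range l.length) _ _ acc hstep, pv_inner]

-- ===== VERDICT (by name: the statement is the Claim_ definition above) =====
theorem all_intron_regions_spec : Claim_equal_all_intron_regions := by
  intro l _ _
  unfold Spec_all_intron_regions all_intron_regions_alt
  rw [pv_A_eq, pv_bridge]
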